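-- pv_equiv track=rewrite | github.com/lixiang2017/leetcode | binarysearch/Blocked_Pipeline.py | solve
-- ===== SOURCE A (Python) =====
-- def solve(n, requests):
--     m = [[0] * n for _ in range(2)]
--     ans = 0
--     # blocked pairs
--     vertical = slop = 0
--     for r, c, t in requests:
--         for nc in (c - 1, c + 1):
--             if 0 <= nc < n:
--                 if t == 1:
--                     if 1 == m[1 - r][nc] and 0 == m[r][c]:
--                         slop += 1
--                 else:
--                     if 1 == m[1 - r][nc] and 1 == m[r][c]:
--                         slop -= 1
--         if t == 0:
--             if 1 == m[1 - r][c] and 1 == m[r][c]: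
--                 vertical -= 1
--         else:
--             if 1 == m[1 - r][c] and 0 == m[r][c]:
--                 vertical += 1
--         m[r][c] = t
--         if 0 == vertical and 0 == slop:
--             ans += 1
--     return ans
-- ===== SOURCE B (Python) =====
-- def _blocked(m, n):
--     if any(m[0][j] == 1 and m[1][j] == 1 for j in range(n)):
--         return True
--     return any((m[0][j] == 1 and m[1][j + 1] == 1) or
--                (m[1][j] == 1 and m[0][j + 1] == 1) for j in range(n - 1))
--
--
-- def solve(n, requests):
--     m = [[0] * n for _ in range(2)]
--     ans = 0
--     for r, c, t in requests:
--         m[r][c] = t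
--         if not _blocked(m, n):
--             ans += 1
--     return ans
-- ===== Notes on version B (the rewrite author's own statement) =====
-- stated objective: simpler
-- what changed: B drops A's incremental vertical/slop difference counters and, after each grid write, recomputes block-freeness by a direct scan of the 2xn grid for vertical and diagonal blocked pairs; Pre_ restricts to the task's natural domain (r in {0,1}, 0 <= c < n, t in {0,1}), outside which A raises IndexError or returns accidental counter values (negative-index wraparound, non-binary cell states).
-- outside the precondition, e.g. on solve(3, [(0, 0, 1), (1, -1, 1)]): A returns 1, B returns 2; on solve(2, [(0, 0, 1), (1, 0, 2), (1, 0, 2)]): A returns 1, B returns 3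
import Mathlib
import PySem

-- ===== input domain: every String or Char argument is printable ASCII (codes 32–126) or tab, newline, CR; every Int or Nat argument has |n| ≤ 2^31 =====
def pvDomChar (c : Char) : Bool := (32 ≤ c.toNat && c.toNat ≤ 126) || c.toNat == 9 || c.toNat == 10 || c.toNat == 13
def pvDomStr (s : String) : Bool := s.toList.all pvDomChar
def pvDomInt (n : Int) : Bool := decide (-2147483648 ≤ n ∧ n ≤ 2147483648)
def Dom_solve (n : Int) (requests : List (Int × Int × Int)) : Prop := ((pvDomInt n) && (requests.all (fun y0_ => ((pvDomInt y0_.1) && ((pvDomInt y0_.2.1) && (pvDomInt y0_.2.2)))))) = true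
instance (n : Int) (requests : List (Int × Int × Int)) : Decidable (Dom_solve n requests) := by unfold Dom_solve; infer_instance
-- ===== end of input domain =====

-- B drops A's incremental vertical/slop counters and recomputes block-freeness by a direct
-- grid scan after each request (simpler; not faster).  A mutates only its local grid.

-- ===== PORT A =====
-- the 2×n grid m is kept as its two rows a = m[0], b = m[1]; under Pre_ the row index r is 0 or 1,
-- so m[r] / m[1-r] become cur / oth below; indices are in range under Pre_, so List.getD/List.set
-- agree with Python's m[..][..] reads/writes there.
def slopUpd (n : Int) (cur oth : List Int) (c t slop nc : Int) : Int :=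
  if 0 ≤ nc ∧ nc < n then
    if t = 1 then
      (if PySem.List.pyGetD oth nc 0 = 1 ∧ PySem.List.pyGetD cur c 0 = 0 then slop + 1 else slop)
    else
      (if PySem.List.pyGetD oth nc 0 = 1 ∧ PySem.List.pyGetD cur c 0 = 1 then slop - 1 else slop)
  else slop

def goA (n : Int) (reqs : List (Int × Int × Int)) (a b : List Int)
    (vertical slop ans : Int) : Int :=
  match reqs with
  | [] => ans
  | (r, c, t) :: rest =>
    let cur := if r = 0 then a else b
    let oth := if r = 0 then b else a
    let slop1 := slopUpd n cur oth c t slop (c - 1)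
    let slop2 := slopUpd n cur oth c t slop1 (c + 1)
    let vertical' :=
      if t = 0 then
        (if PySem.List.pyGetD oth c 0 = 1 ∧ PySem.List.pyGetD cur c 0 = 1 then vertical - 1 else vertical)
      else
        (if PySem.List.pyGetD oth c 0 = 1 ∧ PySem.List.pyGetD cur c 0 = 0 then vertical + 1 else vertical)
    let cur' := PySem.List.pySetD cur c t
    let a' := if r = 0 then cur' else oth
    let b' := if r = 0 then oth else cur'
    let ans' := if vertical' = 0 ∧ slop2 = 0 then ans + 1 else ans
    goA n rest a' b' vertical' slop2 ans'

def solve (n : Int) (requests : List (Int × Int × Int)) : Int :=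
  goA n requests (List.replicate n.toNat 0) (List.replicate n.toNat 0) 0 0 0

-- ===== PORT B =====
def blockedB (a b : List Int) (n : Int) : Bool :=
  ((List.range n.toNat).any fun j => a.getD j 0 == 1 && b.getD j 0 == 1) ||
  ((List.range (n.toNat - 1)).any fun j =>
      (a.getD j 0 == 1 && b.getD (j + 1) 0 == 1) ||
      (b.getD j 0 == 1 && a.getD (j + 1) 0 == 1))

def goB (n : Int) (reqs : List (Int × Int × Int)) (a b : List Int) (ans : Int) : Int :=
  match reqs with
  | [] => ans
  | (r, c, t) :: rest =>
    -- Python's m[r] wraps negative indices: r = 0 or r = -2 reaches row 0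
    let a' := if r = 0 ∨ r = -2 then PySem.List.pySetD a c t else a
    let b' := if r = 0 ∨ r = -2 then b else PySem.List.pySetD b c t
    goB n rest a' b' (if blockedB a' b' n then ans else ans + 1)

def solve_alt (n : Int) (requests : List (Int × Int × Int)) : Int :=
  goB n requests (List.replicate n.toNat 0) (List.replicate n.toNat 0) 0

-- ===== PRECONDITION & SPEC =====
-- Pre_ restricts to the task's natural domain — row r ∈ {0,1}, column 0 ≤ c < n, state t ∈ {0,1};
-- outside it A either raises IndexError or returns accidental values of its counter bookkeeping
-- (negative-index wraparound, non-binary cell states).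
def Pre_solve (n : Int) (requests : List (Int × Int × Int)) : Prop :=
  ∀ x ∈ requests, (x.1 = 0 ∨ x.1 = 1) ∧ (0 ≤ x.2.1 ∧ x.2.1 < n) ∧ (x.2.2 = 0 ∨ x.2.2 = 1)
instance (n : Int) (requests : List (Int × Int × Int)) : Decidable (Pre_solve n requests) := by
  unfold Pre_solve; infer_instance

def pvWitness_solve : Int × (List (Int × Int × Int)) := (2, [(0, 0, 1), (1, 1, 1), (1, 1, 0)])

def Spec_solve (n : Int) (requests : List (Int × Int × Int)) (out : Int) : Prop := out = solve_alt n requests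
instance (n : Int) (requests : List (Int × Int × Int)) (out : Int) : Decidable (Spec_solve n requests out) := by unfold Spec_solve; infer_instance

-- ===== CLAIM (what is proved, stated in full; the proofs are below) =====
def Claim_equal_solve : Prop := ∀ (n : Int) (requests : List (Int × Int × Int)), Dom_solve n requests → Pre_solve n requests → Spec_solve n requests (solve n requests)

-- ===== LEMMAS AND PROOFS =====

-- predicates counted by A's two counters, and counting helpers
def vP (a b : List Int) (j : Nat) : Bool := a.getD j 0 == 1 && b.getD j 0 == 1
def dP (x y : List Int) (j : Nat) : Bool := x.getD j 0 == 1 && y.getD (j + 1) 0 == 1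

def vcount (a b : List Int) (N : Nat) : Int := ((List.range N).countP (vP a b) : Int)
def dcount (x y : List Int) (N : Nat) : Int := ((List.range (N - 1)).countP (dP x y) : Int)

lemma getD_set_eq (l : List Int) (i j : Nat) (x : Int) :
    (l.set i x).getD j 0 = if i = j ∧ j < l.length then x else l.getD j 0 := by
  simp only [List.getD_eq_getElem?_getD, List.getElem?_set]
  split_ifs with h1 h2 h3 <;> simp_all <;> omega

lemma countP_set_delta (p q : Nat → Bool) (c N : Nat) (h : ∀ j, j ≠ c → p j = q j) :
    ((List.range N).countP q : Int) = ((List.range N).countP p : Int) +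
      (if c < N then ((if q c then (1 : Int) else 0) - (if p c then 1 else 0)) else 0) := by
  induction N with
  | zero => simp
  | succ m ih =>
    rw [List.range_succ, List.countP_append, List.countP_append]
    simp only [List.countP_cons, List.countP_nil]
    push_cast
    by_cases hc : c = m
    · subst hc
      have hpq : (List.range c).countP p = (List.range c).countP q :=
        List.countP_congr (by intro x hx; simp at hx; rw [h x (by omega)])
      rw [hpq]
      split_ifs <;> push_cast <;> omega
    · have hm : p m = q m := h m (by omega)
      rw [hm]
      split_ifs at ih ⊢ <;> push_cast <;> omega

lemma vcount_comm (a b : List Int) (N : Nat) : vcount a b N = vcount b a N := by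
  unfold vcount
  congr 1
  apply List.countP_congr
  intro j _; simp [vP, Bool.and_comm]

-- vertical counter update when writing t into cur at c0
lemma vcount_set (cur oth : List Int) (c0 N : Nat) (t : Int)
    (hl : cur.length = N) (hc : c0 < N)
    (hu : cur.getD c0 0 = 0 ∨ cur.getD c0 0 = 1) (ht : t = 0 ∨ t = 1) :
    vcount (cur.set c0 t) oth N = vcount cur oth N +
      (if t = 0 then (if oth.getD c0 0 = 1 ∧ cur.getD c0 0 = 1 then -1 else 0)
       else (if oth.getD c0 0 = 1 ∧ cur.getD c0 0 = 0 then 1 else 0)) := by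
  have h := countP_set_delta (vP cur oth) (vP (cur.set c0 t) oth) c0 N
    (by intro j hj; unfold vP; rw [getD_set_eq, if_neg (by omega)])
  unfold vcount
  rw [h]
  have hgd : (cur.set c0 t).getD c0 0 = t := by rw [getD_set_eq]; simp [hl, hc]
  simp only [vP, hgd, hc, if_pos]
  rcases ht with ht | ht <;> rcases hu with hu | hu <;> subst ht <;>
    simp [hu] <;> split_ifs <;> simp_all <;> omega

-- diagonal counter (cur_j , oth_{j+1}) update when writing t into cur at c0
lemma dcount_set_fst (cur oth : List Int) (c0 N : Nat) (t : Int)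
    (hl : cur.length = N) (hc : c0 < N)
    (hu : cur.getD c0 0 = 0 ∨ cur.getD c0 0 = 1) (ht : t = 0 ∨ t = 1) :
    dcount (cur.set c0 t) oth N = dcount cur oth N +
      (if c0 + 1 < N then
        (if t = 1 then (if oth.getD (c0 + 1) 0 = 1 ∧ cur.getD c0 0 = 0 then 1 else 0)
         else (if oth.getD (c0 + 1) 0 = 1 ∧ cur.getD c0 0 = 1 then -1 else 0))
       else 0) := by
  have h := countP_set_delta (dP cur oth) (dP (cur.set c0 t) oth) c0 (N - 1)
    (by intro j hj; unfold dP; rw [getD_set_eq, if_neg (by omega)])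
  unfold dcount
  rw [h]
  have hgd : (cur.set c0 t).getD c0 0 = t := by rw [getD_set_eq]; simp [hl, hc]
  have hrng : c0 < N - 1 ↔ c0 + 1 < N := by omega
  simp only [dP, hgd, hrng]
  rcases ht with ht | ht <;> rcases hu with hu | hu <;> subst ht <;>
    simp [hu] <;> split_ifs <;> simp_all <;> omega

-- diagonal counter (oth_j , cur_{j+1}) update when writing t into cur at c0
lemma dcount_set_snd (cur oth : List Int) (c0 N : Nat) (t : Int)
    (hl : cur.length = N) (hc : c0 < N)
    (hu : cur.getD c0 0 = 0 ∨ cur.getD c0 0 = 1) (ht : t = 0 ∨ t = 1) :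
    dcount oth (cur.set c0 t) N = dcount oth cur N +
      (if 1 ≤ c0 then
        (if t = 1 then (if oth.getD (c0 - 1) 0 = 1 ∧ cur.getD c0 0 = 0 then 1 else 0)
         else (if oth.getD (c0 - 1) 0 = 1 ∧ cur.getD c0 0 = 1 then -1 else 0))
       else 0) := by
  have h := countP_set_delta (dP oth cur) (dP oth (cur.set c0 t)) (c0 - 1) (N - 1)
    (by intro j hj; unfold dP; rw [getD_set_eq, if_neg (by omega)])
  unfold dcount
  rw [h]
  by_cases hz : 1 ≤ c0
  · have hgd : (cur.set c0 t).getD (c0 - 1 + 1) 0 = t := by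
      rw [getD_set_eq]; simp [hl]; omega
    have hrng : c0 - 1 < N - 1 := by omega
    have he : c0 - 1 + 1 = c0 := by omega
    simp only [dP, hgd, hrng, if_pos, hz, he]
    rcases ht with ht | ht <;> rcases hu with hu | hu <;> subst ht <;>
      simp [hu] <;> split_ifs <;> simp_all <;> omega
  · have hz0 : c0 = 0 := by omega
    subst hz0
    have hgd : (cur.set 0 t).getD 1 0 = cur.getD 1 0 := by
      rw [getD_set_eq]; simp
    simp [dP, hgd]

-- one slopUpd call adds a guarded increment
lemma slopUpd_delta (n : Int) (cur oth : List Int) (c t s nc : Int) (hc : 0 ≤ c) :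
    slopUpd n cur oth c t s nc = s +
      (if 0 ≤ nc ∧ nc < n then
        (if t = 1 then (if oth.getD nc.toNat 0 = 1 ∧ cur.getD c.toNat 0 = 0 then 1 else 0)
         else (if oth.getD nc.toNat 0 = 1 ∧ cur.getD c.toNat 0 = 1 then -1 else 0))
       else 0) := by
  unfold slopUpd
  by_cases hg : 0 ≤ nc ∧ nc < n
  · simp only [if_pos hg, PySem.List.pyGetD_of_nonneg _ _ hg.1,
      PySem.List.pyGetD_of_nonneg _ _ hc]
    split_ifs <;> omega
  · simp [hg]

-- the slopUpd calls of one A-step compute exactly the two dcount deltas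
lemma slop_step (n : Int) (cur oth : List Int) (c t slop : Int)
    (hc : 0 ≤ c ∧ c < n) (hl : cur.length = n.toNat)
    (hu : cur.getD c.toNat 0 = 0 ∨ cur.getD c.toNat 0 = 1) (ht : t = 0 ∨ t = 1)
    (hs : slop = dcount cur oth n.toNat + dcount oth cur n.toNat) :
    slopUpd n cur oth c t (slopUpd n cur oth c t slop (c - 1)) (c + 1) =
      dcount (cur.set c.toNat t) oth n.toNat + dcount oth (cur.set c.toNat t) n.toNat := by
  have hcN : c.toNat < n.toNat := by omega
  rw [dcount_set_fst cur oth c.toNat n.toNat t hl hcN hu ht,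
      dcount_set_snd cur oth c.toNat n.toNat t hl hcN hu ht,
      slopUpd_delta _ _ _ _ _ _ _ hc.1, slopUpd_delta _ _ _ _ _ _ _ hc.1, hs]
  have hg1 : (0 ≤ c - 1 ∧ c - 1 < n) ↔ 1 ≤ c.toNat := by omega
  have hg2 : (0 ≤ c + 1 ∧ c + 1 < n) ↔ c.toNat + 1 < n.toNat := by omega
  have he1 : (c - 1).toNat = c.toNat - 1 := by omega
  have he2 : (c + 1).toNat = c.toNat + 1 := by omega
  rw [he1, he2]
  simp only [hg1, hg2]
  split_ifs <;> omega

-- a 0/1 row stays 0/1 after writing a 0/1 value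
lemma cells01_set (l : List Int) (i : Nat) (t : Int)
    (h : ∀ x ∈ l, x = 0 ∨ x = 1) (ht : t = 0 ∨ t = 1) :
    ∀ x ∈ l.set i t, x = 0 ∨ x = 1 := by
  intro x hx
  rcases List.mem_or_eq_of_mem_set hx with h' | h'
  · exact h x h'
  · subst h'; exact ht

lemma getD_01 (l : List Int) (i : Nat) (h : ∀ x ∈ l, x = 0 ∨ x = 1) :
    l.getD i 0 = 0 ∨ l.getD i 0 = 1 := by
  by_cases hi : i < l.length
  · have : l.getD i 0 = l[i] := List.getD_eq_getElem l 0 hi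
    rw [this]; exact h _ (List.getElem_mem hi)
  · left; simp [List.getD_eq_getElem?_getD, List.getElem?_eq_none (by omega : l.length ≤ i)]

-- "both counters zero" is exactly "B's scan finds no block"
lemma zero_iff_not_blocked (a b : List Int) (n : Int) :
    (vcount a b n.toNat = 0 ∧ dcount a b n.toNat + dcount b a n.toNat = 0) ↔
      blockedB a b n = false := by
  unfold vcount dcount blockedB
  have h1 : (0 : Int) ≤ ((List.range n.toNat).countP (vP a b) : Int) := by positivity
  constructor
  · rintro ⟨hv, hs⟩
    have hd1 : ((List.range (n.toNat - 1)).countP (dP a b)) = 0 := by omega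
    have hd2 : ((List.range (n.toNat - 1)).countP (dP b a)) = 0 := by omega
    have hv' : ((List.range n.toNat).countP (vP a b)) = 0 := by omega
    rw [List.countP_eq_zero] at hd1 hd2 hv'
    simp only [Bool.or_eq_false_iff, List.any_eq_false]
    refine ⟨fun j hj => ?_, fun j hj => ?_⟩
    · have := hv' j hj; simpa [vP] using this
    · have h1' := hd1 j hj; have h2' := hd2 j hj
      simp [dP] at h1' h2' ⊢
      exact ⟨h1', h2'⟩
  · intro h
    simp only [Bool.or_eq_false_iff, List.any_eq_false] at h
    have hv' : ((List.range n.toNat).countP (vP a b)) = 0 := by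
      rw [List.countP_eq_zero]; intro j hj; simpa [vP] using h.1 j hj
    have hd1 : ((List.range (n.toNat - 1)).countP (dP a b)) = 0 := by
      rw [List.countP_eq_zero]; intro j hj
      have := h.2 j hj; simp [dP]; intro h1 h2; simp [h1, h2] at this
    have hd2 : ((List.range (n.toNat - 1)).countP (dP b a)) = 0 := by
      rw [List.countP_eq_zero]; intro j hj
      have := h.2 j hj; simp [dP]; intro h1 h2; simp [h1, h2] at this
    constructor <;> simp [hv', hd1, hd2]

-- main invariant: with valid requests, matching counters and a 0/1 grid, the two loops agree
lemma goA_eq_goB (n : Int) (reqs : List (Int × Int × Int)) :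
    ∀ a b vertical slop ans,
    (∀ x ∈ reqs, (x.1 = 0 ∨ x.1 = 1) ∧ (0 ≤ x.2.1 ∧ x.2.1 < n) ∧ (x.2.2 = 0 ∨ x.2.2 = 1)) →
    a.length = n.toNat → b.length = n.toNat →
    (∀ x ∈ a, x = 0 ∨ x = 1) → (∀ x ∈ b, x = 0 ∨ x = 1) →
    vertical = vcount a b n.toNat →
    slop = dcount a b n.toNat + dcount b a n.toNat →
    goA n reqs a b vertical slop ans = goB n reqs a b ans := by
  induction reqs with
  | nil => intro _ _ _ _ _ _ _ _ _ _ _ _; rfl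
  | cons hd rest ih =>
    obtain ⟨r, c, t⟩ := hd
    intro a b vertical slop ans hvalid hla hlb ha01 hb01 hv hs
    have hx := hvalid (r, c, t) List.mem_cons_self
    have hr : r = 0 ∨ r = 1 := hx.1
    have hc : 0 ≤ c ∧ c < n := hx.2.1
    have ht : t = 0 ∨ t = 1 := hx.2.2
    have hrest := fun x hx => hvalid x (List.mem_cons_of_mem _ hx)
    have hcN : c.toNat < n.toNat := by omega
    rcases hr with hr | hr <;> subst hr
    · -- r = 0 : cur = a, oth = b
      have hu := getD_01 a c.toNat ha01
      have hv' := vcount_set a b c.toNat n.toNat t hla hcN hu ht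
      have hs' := slop_step n a b c t slop hc hla hu ht hs
      have hvv : (if t = 0 then
            (if b.getD c.toNat 0 = 1 ∧ a.getD c.toNat 0 = 1 then vertical - 1 else vertical)
          else
            (if b.getD c.toNat 0 = 1 ∧ a.getD c.toNat 0 = 0 then vertical + 1 else vertical)) =
          vcount (a.set c.toNat t) b n.toNat := by
        rw [hv', hv]; split_ifs <;> omega
      simp only [goA, goB, if_pos rfl, reduceIte,
        if_pos (by norm_num : ((0:Int) = 0 ∨ (0:Int) = -2)),
        PySem.List.pyGetD_of_nonneg _ _ hc.1, PySem.List.pySetD_of_nonneg _ _ hc.1]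
      rw [ih (a.set c.toNat t) b _ _ _ hrest (by simpa using hla) hlb
        (cells01_set a c.toNat t ha01 ht) hb01 hvv hs']
      congr 1
      rw [hvv, hs']
      have hz := zero_iff_not_blocked (a.set c.toNat t) b n
      cases hbb : blockedB (a.set c.toNat t) b n with
      | false => rw [if_pos (hz.mpr hbb)]; simp [hbb]
      | true =>
        rw [if_neg (fun hcond => by simp [hz.mp hcond] at hbb)]; simp [hbb]
    · -- r = 1 : cur = b, oth = a
      have hu := getD_01 b c.toNat hb01
      have hv' := vcount_set b a c.toNat n.toNat t hlb hcN hu ht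
      have hs' := slop_step n b a c t slop hc hlb hu ht (by rw [hs]; omega)
      have hvv : (if t = 0 then
            (if a.getD c.toNat 0 = 1 ∧ b.getD c.toNat 0 = 1 then vertical - 1 else vertical)
          else
            (if a.getD c.toNat 0 = 1 ∧ b.getD c.toNat 0 = 0 then vertical + 1 else vertical)) =
          vcount a (b.set c.toNat t) n.toNat := by
        rw [vcount_comm, hv', vcount_comm b a, ← hv]; split_ifs <;> omega
      have hss : slopUpd n b a c t (slopUpd n b a c t slop (c - 1)) (c + 1) =
          dcount a (b.set c.toNat t) n.toNat + dcount (b.set c.toNat t) a n.toNat := by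
        rw [hs']; omega
      simp only [goA, goB, reduceIte, if_neg (by omega : ¬ (1:Int) = 0),
        if_neg (by norm_num : ¬ ((1:Int) = 0 ∨ (1:Int) = -2)),
        PySem.List.pyGetD_of_nonneg _ _ hc.1, PySem.List.pySetD_of_nonneg _ _ hc.1]
      rw [ih a (b.set c.toNat t) _ _ _ hrest hla (by simpa using hlb)
        ha01 (cells01_set b c.toNat t hb01 ht) hvv hss]
      congr 1
      rw [hvv, hss]
      have hz := zero_iff_not_blocked a (b.set c.toNat t) n
      cases hbb : blockedB a (b.set c.toNat t) n with
      | false => rw [if_pos (hz.mpr hbb)]; simp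
      | true =>
        rw [if_neg (fun hcond => by simp [hz.mp hcond] at hbb)]; simp

-- ===== VERDICT (by name: the statement is the Claim_ definition above) =====
theorem solve_spec : Claim_equal_solve := by
  intro n requests _ hpre
  unfold Spec_solve solve solve_alt
  exact goA_eq_goB n requests _ _ _ _ _ hpre (by simp) (by simp)
    (by intro x hx; simp at hx; omega) (by intro x hx; simp at hx; omega)
    (by unfold vcount vP; simp [List.countP_eq_zero])
    (by unfold dcount dP; simp [List.countP_eq_zero])
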